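-- pv_equiv track=rewrite | github.com/kkr010128/codebert | problem252/problem252_116.py | f
-- ===== SOURCE A (Python) =====
-- def f(n):
--     r = 2
--     ret = 1
--     for i in range(n, n-r, -1):
--         ret *= i
--     for i in range(1, r+1):
--         ret //= i
--     return ret * 2 + n
-- ===== SOURCE B (Python) =====
-- def f(n):
--     # closed form: the loops compute n*(n-1)//2; doubled plus n this is n*n
--     return n * n
-- ===== Notes on version B (the rewrite author's own statement) =====
-- stated objective: simpler
-- what changed: Replaced the two constant-length loops computing the binomial coefficient 'n choose two' times two plus n by the closed form n*n, using the identity n(n-1)+n = n^2.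
import Mathlib
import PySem

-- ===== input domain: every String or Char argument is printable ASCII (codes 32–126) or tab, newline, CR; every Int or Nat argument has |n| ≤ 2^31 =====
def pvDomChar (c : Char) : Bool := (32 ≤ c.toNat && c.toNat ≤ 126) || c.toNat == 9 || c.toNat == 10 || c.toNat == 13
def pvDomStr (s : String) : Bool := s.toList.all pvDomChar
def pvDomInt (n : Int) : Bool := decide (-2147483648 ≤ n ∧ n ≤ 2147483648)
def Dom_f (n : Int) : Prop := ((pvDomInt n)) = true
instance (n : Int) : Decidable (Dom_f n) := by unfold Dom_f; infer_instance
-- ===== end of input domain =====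

-- B replaces the two constant loops (binomial coefficient times two, plus n) by the closed form n*n; objective: simpler.

-- ===== PORT A =====
def f (n : Int) : Int :=
  let r : Int := 2
  let ret : Int := 1
  let ret := (PySem.List.pyRange n (n - r) (-1)).foldl (fun acc i => acc * i) ret
  let ret := (PySem.List.pyRange 1 (r + 1) 1).foldl (fun acc i => PySem.Int.floordiv acc i) ret
  ret * 2 + n

-- ===== PORT B =====
def f_alt (n : Int) : Int := n * n

-- ===== PRECONDITION & SPEC =====
def Spec_f (n : Int) (out : Int) : Prop := out = f_alt n
instance (n : Int) (out : Int) : Decidable (Spec_f n out) := by unfold Spec_f; infer_instance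

-- ===== CLAIM (what is proved, stated in full; the proofs are below) =====
def Claim_equal_f : Prop := ∀ (n : Int), Dom_f n → Spec_f n (f n)

-- ===== LEMMAS AND PROOFS =====

lemma pvRangeDown (n : Int) : PySem.List.pyRange n (n - 2) (-1) = [n, n - 1] := by
  rw [PySem.List.pyRange_neg_one_cons (by omega), PySem.List.pyRange_neg_one_cons (by omega),
      PySem.List.pyRange_neg_one_eq_nil (by omega)]

lemma pvRangeUp : PySem.List.pyRange 1 (2 + 1) 1 = [1, 2] := by decide

-- ===== VERDICT (by name: the statement is the Claim_ definition above) =====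
theorem f_spec : Claim_equal_f := by
  intro n _
  show f n = f_alt n
  unfold f f_alt
  simp only [pvRangeDown, List.foldl]
  have hdvd : (2 : Int) ∣ n * (n - 1) := by
    rcases Int.even_or_odd n with h | h
    · exact Dvd.dvd.mul_right h.two_dvd _
    · obtain ⟨k, hk⟩ := h
      exact Dvd.dvd.mul_left ⟨k, by omega⟩ _
  have h1 : PySem.Int.floordiv (1 * n * (n - 1)) 1 = n * (n - 1) := by
    rw [PySem.Int.floordiv_eq_ediv_of_pos (by omega)]; simp
  rw [pvRangeUp]
  simp only [List.foldl]
  rw [h1, PySem.Int.floordiv_eq_ediv_of_pos (by omega), Int.ediv_mul_cancel hdvd]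
  ring
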